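-- pv_equiv track=rewrite | github.com/fColangelo/MORA-Multi-Objective-Routing-Algorithm | traffic_matrix_generator.py | generate_traffic_matrix_data
-- ===== SOURCE A (Python) =====
-- def generate_traffic_matrix_data(traffic_data, traffic_directions):
--
--     traffic_matrix_data = {}
--
--     road = traffic_directions[0]
--     nodeA_name = road[:len(road)//2]
--     nodeB_name = road[len(road)//2:]
--     traffic_matrix_data[nodeA_name] = {nodeB_name : traffic_data[0]}
--
--     for i in range(1,len(traffic_directions)):
--
--         road = traffic_directions[i]
--         nodeA_name = road[:len(road)//2]
--         nodeB_name = road[len(road)//2:]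
--
--         prev_road = traffic_directions[i-1]
--         prev_nodeA_name = prev_road[:len(prev_road)//2]
--
--         if nodeA_name != prev_nodeA_name:
--             traffic_matrix_data[nodeA_name] = {}
--
--         traffic_matrix_data[nodeA_name].update({nodeB_name : traffic_data[i]})
--
--     return traffic_matrix_data
-- ===== SOURCE B (Python) =====
-- def generate_traffic_matrix_data(traffic_data, traffic_directions):
--     # Pair each direction string with its traffic value (indexing, so a short
--     # traffic_data raises IndexError exactly like the original).
--     keyed = []
--     for i, road in enumerate(traffic_directions):
--         half = len(road) // 2
--         keyed.append((road[:half], (road[half:], traffic_data[i])))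
--     # Group consecutive items that share the same source node into runs.
--     runs = []
--     for node_a, pair in keyed:
--         if runs and runs[-1][0] == node_a:
--             runs[-1][1].append(pair)
--         else:
--             runs.append((node_a, [pair]))
--     # A later run for the same source node replaces the earlier one, keeping
--     # the key's original position -- exactly the reset-on-change behaviour.
--     return {node_a: dict(pairs) for node_a, pairs in runs}
-- ===== Notes on version B (the rewrite author's own statement) =====
-- stated objective: alternative
-- what changed: A's single index loop compares each direction with its predecessor and resets/updates a nested dict in place; B is a pipeline: key each direction with its value, group consecutive equal source nodes into runs, then build the result with a dict comprehension in which each run's dict replaces the previous run for that key.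
import Mathlib
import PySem

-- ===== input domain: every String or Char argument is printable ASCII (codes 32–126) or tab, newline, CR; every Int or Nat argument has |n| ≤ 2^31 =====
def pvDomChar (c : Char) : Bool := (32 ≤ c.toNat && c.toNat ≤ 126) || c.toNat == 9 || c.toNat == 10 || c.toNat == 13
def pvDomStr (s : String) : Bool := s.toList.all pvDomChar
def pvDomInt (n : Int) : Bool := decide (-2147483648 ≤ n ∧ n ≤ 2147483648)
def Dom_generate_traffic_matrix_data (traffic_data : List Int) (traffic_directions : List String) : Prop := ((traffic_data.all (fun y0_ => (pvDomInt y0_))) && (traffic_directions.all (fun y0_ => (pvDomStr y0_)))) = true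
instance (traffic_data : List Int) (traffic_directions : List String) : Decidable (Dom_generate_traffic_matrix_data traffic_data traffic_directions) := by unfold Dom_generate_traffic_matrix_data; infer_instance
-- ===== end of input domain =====

-- B replaces A's single index loop (compare with previous direction, reset/update a nested
-- dict in place) by a pipeline: key each direction with its value, group consecutive equal
-- source nodes into runs, then build the dict run by run; objective: alternative, same cost.

-- ===== PORT A =====
-- road[:len(road)//2] and road[len(road)//2:]
def pvHalfA (road : String) : Int := PySem.Int.floordiv (PySem.Str.len road) 2
def pvNodeA_name (road : String) : String := PySem.Str.slice road none (some (pvHalfA road))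
def pvNodeB_name (road : String) : String := PySem.Str.slice road (some (pvHalfA road)) none

-- the body of A's for-loop over i in range(1, len(traffic_directions))
def pvBodyA (traffic_directions : List String) (traffic_data : List Int)
    (traffic_matrix_data : PySem.Dict String (PySem.Dict String Int)) (i : Int) :
    PySem.Dict String (PySem.Dict String Int) :=
  let road := (PySem.List.pyGet? traffic_directions i).getD ""
  let nodeA := pvNodeA_name road
  let nodeB := pvNodeB_name road
  let prev_road := (PySem.List.pyGet? traffic_directions (i - 1)).getD ""
  let prevA := pvNodeA_name prev_road
  let d1 := if nodeA ≠ prevA then traffic_matrix_data.insert nodeA PySem.Dict.empty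
            else traffic_matrix_data
  d1.insert nodeA ((d1.getD nodeA PySem.Dict.empty).insert nodeB
    ((PySem.List.pyGet? traffic_data i).getD 0))

def generate_traffic_matrix_data (traffic_data : List Int) (traffic_directions : List String) :
    List (String × List (String × Int)) :=
  let road := (PySem.List.pyGet? traffic_directions 0).getD ""
  let d0 := (PySem.Dict.empty : PySem.Dict String (PySem.Dict String Int)).insert
      (pvNodeA_name road)
      (PySem.Dict.empty.insert (pvNodeB_name road) ((PySem.List.pyGet? traffic_data 0).getD 0))
  let d := (PySem.List.pyRange 1 (traffic_directions.length : Int)).foldl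
      (pvBodyA traffic_directions traffic_data) d0
  d.items.map (fun kv => (kv.1, kv.2.items))

-- ===== PORT B =====
-- keyed = [(road[:h], (road[h:], traffic_data[i])) for i, road in enumerate(traffic_directions)]
def pvKeyedB (traffic_data : List Int) (traffic_directions : List String) :
    List (String × (String × Int)) :=
  (PySem.List.enumerate traffic_directions 0).foldl
    (fun acc it =>
      let half := PySem.Int.floordiv (PySem.Str.len it.2) 2
      acc ++ [(PySem.Str.slice it.2 none (some half),
               (PySem.Str.slice it.2 (some half) none,
                (PySem.List.pyGet? traffic_data it.1).getD 0))]) []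

-- one step of B's run-grouping loop
def pvAddRun (runs : List (String × List (String × Int))) (x : String × (String × Int)) :
    List (String × List (String × Int)) :=
  match runs.getLast? with
  | some last =>
      if last.1 == x.1 then runs.dropLast ++ [(last.1, last.2 ++ [x.2])]
      else runs ++ [(x.1, [x.2])]
  | none => [(x.1, [x.2])]

-- {node_a: dict(pairs) for node_a, pairs in runs}
def pvRunsDict (runs : List (String × List (String × Int))) :
    PySem.Dict String (PySem.Dict String Int) :=
  runs.foldl (fun d r => d.insert r.1 (PySem.Dict.ofList r.2)) PySem.Dict.empty

def generate_traffic_matrix_data_alt (traffic_data : List Int) (traffic_directions : List String) :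
    List (String × List (String × Int)) :=
  let runs := (pvKeyedB traffic_data traffic_directions).foldl pvAddRun []
  (pvRunsDict runs).items.map (fun kv => (kv.1, kv.2.items))

-- ===== PRECONDITION & SPEC =====
-- Pre_ excludes exactly the inputs on which Python A raises IndexError: an empty
-- traffic_directions (A reads traffic_directions[0]) and a traffic_data shorter than
-- traffic_directions (A reads traffic_data[i] for every i below len(traffic_directions)).
def Pre_generate_traffic_matrix_data (traffic_data : List Int) (traffic_directions : List String) : Prop :=
  traffic_directions ≠ [] ∧ traffic_directions.length ≤ traffic_data.length
instance (traffic_data : List Int) (traffic_directions : List String) : Decidable (Pre_generate_traffic_matrix_data traffic_data traffic_directions) := by unfold Pre_generate_traffic_matrix_data; infer_instance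

def pvWitness_generate_traffic_matrix_data : List Int × List String :=
  ([3, 7, 5], ["AB", "AC", "CB"])

def Spec_generate_traffic_matrix_data (traffic_data : List Int) (traffic_directions : List String) (out : List (String × List (String × Int))) : Prop := out = generate_traffic_matrix_data_alt traffic_data traffic_directions
instance (traffic_data : List Int) (traffic_directions : List String) (out : List (String × List (String × Int))) : Decidable (Spec_generate_traffic_matrix_data traffic_data traffic_directions out) := by unfold Spec_generate_traffic_matrix_data; infer_instance

-- ===== CLAIM (what is proved, stated in full; the proofs are below) =====
def Claim_equal_generate_traffic_matrix_data : Prop := ∀ (traffic_data : List Int) (traffic_directions : List String), Dom_generate_traffic_matrix_data traffic_data traffic_directions → Pre_generate_traffic_matrix_data traffic_data traffic_directions → Spec_generate_traffic_matrix_data traffic_data traffic_directions (generate_traffic_matrix_data traffic_data traffic_directions)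


-- ===== LEMMAS AND PROOFS =====

-- the item B builds for position i of the enumeration
def pvKeyF (traffic_data : List Int) (it : Int × String) : String × (String × Int) :=
  let half := PySem.Int.floordiv (PySem.Str.len it.2) 2
  (PySem.Str.slice it.2 none (some half),
   (PySem.Str.slice it.2 (some half) none,
    (PySem.List.pyGet? traffic_data it.1).getD 0))

-- A's loop step, with the previous source node threaded through the state
def pvStepK (st : PySem.Dict String (PySem.Dict String Int) × String)
    (x : String × (String × Int)) : PySem.Dict String (PySem.Dict String Int) × String :=
  let d1 := if x.1 ≠ st.2 then st.1.insert x.1 PySem.Dict.empty else st.1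
  (d1.insert x.1 ((d1.getD x.1 PySem.Dict.empty).insert x.2.1 x.2.2), x.1)

theorem pvKeyedB_eq_map (traffic_data : List Int) (traffic_directions : List String) :
    pvKeyedB traffic_data traffic_directions
      = (PySem.List.enumerate traffic_directions 0).map (pvKeyF traffic_data) := by
  simpa [pvKeyedB, pvKeyF] using
    PySem.List.foldl_append_singleton_eq_map (pvKeyF traffic_data)
      (PySem.List.enumerate traffic_directions 0) []

theorem pvOfList_append (ps : List (String × Int)) (q : String × Int) :
    PySem.Dict.ofList (ps ++ [q]) = (PySem.Dict.ofList ps).insert q.1 q.2 := by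
  simp [PySem.Dict.ofList, PySem.Dict.update, List.foldl_append]

theorem pvRunsDict_append (r : List (String × List (String × Int))) (p : String × List (String × Int)) :
    pvRunsDict (r ++ [p]) = (pvRunsDict r).insert p.1 (PySem.Dict.ofList p.2) := by
  simp [pvRunsDict, List.foldl_append]

-- invariant: a pvStepK fold from a "runs" dict is the dict of the updated runs
theorem pvInv (xs : List (String × (String × Int))) :
    ∀ (r' : List (String × List (String × Int))) (a : String) (ps : List (String × Int)),
      (xs.foldl pvStepK (pvRunsDict (r' ++ [(a, ps)]), a)).1
        = pvRunsDict (xs.foldl pvAddRun (r' ++ [(a, ps)])) := by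
  induction xs with
  | nil => intro r' a ps; simp
  | cons x xs ih =>
    intro r' a ps
    by_cases hx : a = x.1
    · have hstep : pvStepK (pvRunsDict (r' ++ [(a, ps)]), a) x
          = (pvRunsDict (r' ++ [(a, ps ++ [x.2])]), x.1) := by
        subst hx
        simp only [pvStepK, pvRunsDict_append, pvOfList_append, ne_eq, not_true_eq_false]
        rw [if_neg (by simp)]
        simp [PySem.Dict.getD_insert_self, PySem.Dict.insert_insert_self]
      have hadd : pvAddRun (r' ++ [(a, ps)]) x = r' ++ [(a, ps ++ [x.2])] := by
        simp [pvAddRun, hx]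
      rw [List.foldl_cons, hstep, List.foldl_cons, hadd, hx, ih]
    · have hstep : pvStepK (pvRunsDict (r' ++ [(a, ps)]), a) x
          = (pvRunsDict ((r' ++ [(a, ps)]) ++ [(x.1, [x.2])]), x.1) := by
        simp only [pvStepK, if_pos (by simpa using Ne.symm hx)]
        rw [pvRunsDict_append ((r' ++ [(a, ps)])) (x.1, [x.2])]
        simp [PySem.Dict.getD_insert_self, PySem.Dict.insert_insert_self]
        rfl
      have hadd : pvAddRun (r' ++ [(a, ps)]) x = (r' ++ [(a, ps)]) ++ [(x.1, [x.2])] := by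
        simp [pvAddRun, fun h : a = x.1 => hx h]
      rw [List.foldl_cons, hstep, List.foldl_cons, hadd]
      exact ih (r' ++ [(a, ps)]) x.1 [x.2]

-- bridge: A's fold over range(j, n) is the pvStepK fold over the keyed tail
theorem pvBridge (traffic_data : List Int) (traffic_directions : List String) :
    ∀ (m : Nat) (j : Nat) (d : PySem.Dict String (PySem.Dict String Int)),
      m = traffic_directions.length - j → 1 ≤ j → j ≤ traffic_directions.length →
      (PySem.List.pyRange (j : Int) (traffic_directions.length : Int)).foldl
          (pvBodyA traffic_directions traffic_data) d
        = ((((PySem.List.enumerate traffic_directions 0).map (pvKeyF traffic_data)).drop j).foldl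
            pvStepK (d, pvNodeA_name (traffic_directions.getD (j - 1) ""))).1 := by
  intro m
  induction m with
  | zero =>
    intro j d hm h1 h2
    have hj : j = traffic_directions.length := by omega
    rw [PySem.List.pyRange_one_eq_nil (by omega)]
    rw [List.drop_eq_nil_of_le (by simpa using hj.ge)]
    simp
  | succ m ih =>
    intro j d hm h1 h2
    have hj : j < traffic_directions.length := by omega
    rw [PySem.List.pyRange_one_cons (by exact_mod_cast hj)]
    rw [List.foldl_cons]
    have hlen : j < ((PySem.List.enumerate traffic_directions 0).map (pvKeyF traffic_data)).length := by
      simpa [PySem.List.length_enumerate] using hj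
    rw [List.drop_eq_getElem_cons hlen, List.foldl_cons]
    have hget : ((PySem.List.enumerate traffic_directions 0).map (pvKeyF traffic_data))[j]
        = pvKeyF traffic_data ((j : Int), traffic_directions[j]) := by
      simp [PySem.List.getElem_enumerate]
    have hstep : pvStepK (d, pvNodeA_name (traffic_directions.getD (j - 1) ""))
          (pvKeyF traffic_data ((j : Int), traffic_directions[j]))
        = (pvBodyA traffic_directions traffic_data d (j : Int), pvNodeA_name traffic_directions[j]) := by
      have hij : ((j : Int)) - 1 = ((j - 1 : Nat) : Int) := by omega
      have hg1 : (PySem.List.pyGet? traffic_directions (j : Int)).getD ""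
          = traffic_directions[j] := by
        simp [hj]
      have hg2 : (PySem.List.pyGet? traffic_directions ((j : Int) - 1)).getD ""
          = traffic_directions.getD (j - 1) "" := by
        rw [hij, PySem.List.pyGet?_natCast]
        simp [List.getD]
      simp only [pvStepK, pvBodyA, pvKeyF, pvNodeA_name, pvNodeB_name, pvHalfA, hg1, hg2]
    rw [hget, hstep]
    have hcast : ((j : Int)) + 1 = (((j + 1 : Nat)) : Int) := by omega
    rw [hcast, ih (j + 1) _ (by omega) (by omega) (by omega)]
    have : traffic_directions.getD (j + 1 - 1) "" = traffic_directions[j] := by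
      simp [List.getD, hj]
    rw [this]

-- ===== VERDICT (by name: the statement is the Claim_ definition above) =====
theorem generate_traffic_matrix_data_spec : Claim_equal_generate_traffic_matrix_data := by
  intro td ds _ hpre
  obtain ⟨hne, -⟩ := hpre
  obtain ⟨s0, rest, rfl⟩ := List.exists_cons_of_ne_nil hne
  unfold Spec_generate_traffic_matrix_data
  simp only [generate_traffic_matrix_data, generate_traffic_matrix_data_alt]
  rw [pvKeyedB_eq_map]
  have hroad : (PySem.List.pyGet? (s0 :: rest) (0 : Int)).getD "" = s0 := by
    simp
  have hv0 : (PySem.List.pyGet? td (0 : Int)).getD 0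
      = (pvKeyF td ((0 : Int), s0)).2.2 := by simp [pvKeyF]
  have hd0 : (PySem.Dict.empty : PySem.Dict String (PySem.Dict String Int)).insert
      (pvNodeA_name ((PySem.List.pyGet? (s0 :: rest) (0 : Int)).getD ""))
      (PySem.Dict.empty.insert (pvNodeB_name ((PySem.List.pyGet? (s0 :: rest) (0 : Int)).getD ""))
        ((PySem.List.pyGet? td (0 : Int)).getD 0))
      = pvRunsDict [((pvKeyF td ((0 : Int), s0)).1, [(pvKeyF td ((0 : Int), s0)).2])] := by
    rw [hroad]
    simp [pvRunsDict, pvKeyF, pvNodeA_name, pvNodeB_name, pvHalfA, PySem.Dict.ofList,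
      PySem.Dict.update, PySem.Str.len_eq]
  have hmap : ((PySem.List.enumerate (s0 :: rest) 0).map (pvKeyF td))
      = pvKeyF td ((0 : Int), s0) :: ((PySem.List.enumerate rest 1).map (pvKeyF td)) := by
    simp [PySem.List.enumerate_cons]
  by_cases hrest : rest = []
  · subst hrest
    rw [hd0, PySem.List.pyRange_one_eq_nil (by simp)]
    simp [pvAddRun, pvKeyF, pvRunsDict, PySem.Dict.ofList, PySem.Dict.update]
  · have hlen1 : 1 ≤ (s0 :: rest).length := by simp
    have hlt : 1 < (s0 :: rest).length := by
      cases rest with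
      | nil => exact absurd rfl hrest
      | cons y ys => simp
    rw [hd0]
    rw [show (PySem.List.pyRange 1 ((s0 :: rest).length : Int))
          = PySem.List.pyRange ((1 : Nat) : Int) ((s0 :: rest).length : Int) by norm_num]
    rw [pvBridge td (s0 :: rest) ((s0 :: rest).length - 1) 1 _ rfl le_rfl hlen1]
    have hprev : pvNodeA_name ((s0 :: rest).getD 0 "") = (pvKeyF td ((0 : Int), s0)).1 := by
      simp [pvKeyF, pvNodeA_name, pvHalfA, PySem.Str.len_eq]
    rw [hprev]
    rw [← List.nil_append [((pvKeyF td ((0 : Int), s0)).1, [(pvKeyF td ((0 : Int), s0)).2])]]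
    rw [pvInv _ [] _ _]
    have hdrop : (((PySem.List.enumerate (s0 :: rest) 0).map (pvKeyF td)).drop 1)
        = (PySem.List.enumerate rest 1).map (pvKeyF td) := by
      rw [hmap]; rfl
    rw [hdrop, hmap]
    have hfirst : pvAddRun [] (pvKeyF td ((0 : Int), s0))
        = [((pvKeyF td ((0 : Int), s0)).1, [(pvKeyF td ((0 : Int), s0)).2])] := by
      simp [pvAddRun]
    rw [List.foldl_cons, hfirst, List.nil_append]
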